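-- pv_equiv track=rewrite | github.com/pypi-data/pypi-mirror-375 | packages/pyrex3/pyrex3-1.0.2-py3-none-any.whl/pyrex/utils/errors.py | _extract_primary_error_message
-- ===== SOURCE A (Python) =====
-- def _extract_primary_error_message(error_output: str) -> str:
--     """Extract the primary error message from output."""
--     lines = error_output.strip().split("\n")
--     for line in lines:
--         line = line.strip()
--         if any(
--             keyword in line.lower()
--             for keyword in ["error:", "fatal:", "failed"]
--         ):
--             return line
--     for line in lines:
--         if line.strip():
--             return line.strip()
--     return "Unknown error"
-- ===== SOURCE B (Python) =====
-- def _extract_primary_error_message(error_output: str) -> str: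
--     """Extract the primary error message from output (single pass)."""
--     fallback = None
--     for line in error_output.strip().split("\n"):
--         line = line.strip()
--         if any(k in line.lower() for k in ("error:", "fatal:", "failed")):
--             return line
--         if line and fallback is None:
--             fallback = line
--     return fallback if fallback is not None else "Unknown error"
-- ===== Notes on version B (the rewrite author's own statement) =====
-- stated objective: simpler
-- what changed: Replaces A's two sequential scans over the lines with a single pass that returns a keyword line immediately and remembers the first non-empty stripped line as a fallback.
import Mathlib
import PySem

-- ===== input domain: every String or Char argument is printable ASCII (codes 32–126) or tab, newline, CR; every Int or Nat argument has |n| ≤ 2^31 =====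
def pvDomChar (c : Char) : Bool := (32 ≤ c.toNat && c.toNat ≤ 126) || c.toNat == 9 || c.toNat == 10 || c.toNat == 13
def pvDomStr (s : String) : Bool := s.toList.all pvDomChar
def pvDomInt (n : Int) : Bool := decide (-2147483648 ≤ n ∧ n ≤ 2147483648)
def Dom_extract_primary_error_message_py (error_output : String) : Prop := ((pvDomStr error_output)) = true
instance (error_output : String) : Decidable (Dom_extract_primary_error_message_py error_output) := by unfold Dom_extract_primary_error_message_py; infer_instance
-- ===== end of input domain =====

-- B is a single pass over the stripped lines (keyword hit returns immediately, first
-- non-empty stripped line kept as fallback) instead of A's two sequential scans.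

-- shared helper: the keyword test both Pythons literally perform on a stripped line
def pvHasKeyword (s : String) : Bool :=
  ["error:", "fatal:", "failed"].any (fun kw => PySem.Str.isIn kw (PySem.Str.lower s))

-- ===== PORT A =====
-- A's first loop: first line whose stripped form contains a keyword (returned stripped)
def pvALoop1 : List String → Option String
  | [] => none
  | l :: ls =>
    let line := PySem.Str.strip l
    if pvHasKeyword line then some line else pvALoop1 ls

-- A's second loop: first line whose stripped form is non-empty (returned stripped)
def pvALoop2 : List String → Option String
  | [] => none
  | l :: ls => if PySem.Str.strip l ≠ "" then some (PySem.Str.strip l) else pvALoop2 ls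

def extract_primary_error_message_py (error_output : String) : String :=
  let lines := (PySem.Str.split? (PySem.Str.strip error_output) "\n").getD []
  match pvALoop1 lines with
  | some r => r
  | none =>
    match pvALoop2 lines with
    | some r => r
    | none => "Unknown error"

-- ===== PORT B =====
-- B's single loop, carrying the fallback accumulator
def pvBLoop : List String → Option String → String
  | [], fb => fb.getD "Unknown error"
  | l :: ls, fb =>
    let line := PySem.Str.strip l
    if pvHasKeyword line then line
    else pvBLoop ls (if fb.isNone && line ≠ "" then some line else fb)

def extract_primary_error_message_py_alt (error_output : String) : String :=
  pvBLoop ((PySem.Str.split? (PySem.Str.strip error_output) "\n").getD []) none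

-- ===== PRECONDITION & SPEC =====
def Spec_extract_primary_error_message_py (error_output : String) (out : String) : Prop := out = extract_primary_error_message_py_alt error_output
instance (error_output : String) (out : String) : Decidable (Spec_extract_primary_error_message_py error_output out) := by unfold Spec_extract_primary_error_message_py; infer_instance

-- ===== CLAIM (what is proved, stated in full; the proofs are below) =====
def Claim_equal_extract_primary_error_message_py : Prop := ∀ (error_output : String), Dom_extract_primary_error_message_py error_output → Spec_extract_primary_error_message_py error_output (extract_primary_error_message_py error_output)

-- ===== LEMMAS AND PROOFS =====

theorem pvBLoop_eq (ls : List String) (fb : Option String) :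
    pvBLoop ls fb =
      match pvALoop1 ls with
      | some r => r
      | none =>
        match fb.orElse (fun _ => pvALoop2 ls) with
        | some r => r
        | none => "Unknown error" := by
  induction ls generalizing fb with
  | nil => cases fb <;> simp [pvBLoop, pvALoop1, pvALoop2, Option.orElse, Option.getD]
  | cons l ls ih =>
    simp only [pvBLoop, pvALoop1, pvALoop2]
    by_cases hk : pvHasKeyword (PySem.Str.strip l)
    · simp [hk]
    · simp only [hk, ih]
      cases fb with
      | some x => by_cases hs : PySem.Str.strip l = "" <;> simp [hs, Option.orElse]
      | none => by_cases hs : PySem.Str.strip l = "" <;> simp [hs, Option.orElse]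

-- ===== VERDICT (by name: the statement is the Claim_ definition above) =====
theorem extract_primary_error_message_py_spec : Claim_equal_extract_primary_error_message_py := by
  intro e _
  unfold Spec_extract_primary_error_message_py extract_primary_error_message_py extract_primary_error_message_py_alt
  rw [pvBLoop_eq]
  simp [Option.orElse]
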